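-- pv_equiv track=rewrite | github.com/dragoon/kilogram | mapreduce/entity_linking/spark_candidate_ngrams.py | generate_label_ngrams
-- ===== SOURCE A (Python) =====
-- from itertools import combinations
--
-- def generate_label_ngrams(line):
--     result_labels = set()
--
--     def proper_label(uri):
--         # TODO: many urls start with '(', (79473)_1998_BX8, (R)-2-Methyl-CBS-oxazaborolidine
--         label = uri.split(',', 1)[0].split('(', 1)[0]
--         label = label.replace('_', ' ').strip()
--         return label
--
--     uri, types, redirects = line.split('\t')
--     types = set(types.split(' '))
--     label = proper_label(uri)
--     if 'Person' in types:
--         label = label.split()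
--         for i in range(1, len(label)+1):
--             for ngram in combinations(label, i):
--                 result_labels.add(' '.join(ngram))
--     else:
--         result_labels.add(label)
--     # add redirects
--     for redirect in redirects.split():
--         redirect_label = proper_label(redirect)
--         if len(redirect_label) > 0:
--             result_labels.add(redirect_label)
--
--     return uri, result_labels
-- ===== SOURCE B (Python) =====
-- def generate_label_ngrams(line):
--     def proper_label(uri):
--         # single scan: cut at the first ',' or '(', translating '_' -> ' ' on the fly
--         chars = []
--         for c in uri:
--             if c in ',(':
--                 break
--             chars.append(' ' if c == '_' else c)
--         return ''.join(chars).strip()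
--
--     uri, types, redirects = line.split('\t')
--
--     if 'Person' in types.split(' '):
--         words = proper_label(uri).split()
--         # iterative power-set builder (prepend over reversed words keeps word order)
--         subsets = [[]]
--         for w in reversed(words):
--             subsets = [[w] + s for s in subsets] + subsets
--         base = [' '.join(s)
--                 for k in range(1, len(words) + 1)
--                 for s in subsets if len(s) == k]
--     else:
--         base = [proper_label(uri)]
--
--     extras = [proper_label(r) for r in redirects.split()]
--     return uri, set(base + [rl for rl in extras if rl])
-- ===== Notes on version B (the rewrite author's own statement) =====
-- stated objective: alternative
-- what changed: B parses by pattern-matching the tab-split, trims each label in a single character scan (cut at the first ',' or '(' while translating '_' to ' ' on the fly) instead of two split-and-replace passes, replaces the Person branch's nested combinations-by-size loops with an iterative power-set builder emitted grouped by size, and collects all candidate labels into one plain list that is deduplicated once at the end instead of incremental set.add calls.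
import Mathlib
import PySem

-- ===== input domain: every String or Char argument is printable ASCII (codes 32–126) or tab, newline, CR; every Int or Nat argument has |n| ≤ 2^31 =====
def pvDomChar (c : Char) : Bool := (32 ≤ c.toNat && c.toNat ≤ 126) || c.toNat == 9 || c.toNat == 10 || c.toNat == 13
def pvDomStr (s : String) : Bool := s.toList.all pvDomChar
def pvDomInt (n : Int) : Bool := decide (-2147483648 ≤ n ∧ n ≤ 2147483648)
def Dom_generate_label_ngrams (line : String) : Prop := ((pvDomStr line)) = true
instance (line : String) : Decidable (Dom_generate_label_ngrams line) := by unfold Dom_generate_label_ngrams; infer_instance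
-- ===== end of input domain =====

-- B parses by pattern, trims the label in a single character scan (cut at ',' '(' while mapping '_'->' '),
-- replaces the Person branch's nested combinations loops by an iterative power-set builder emitted grouped by
-- size, and collects all candidate labels into one list deduplicated once at the end (alternative decomposition, same cost).


-- ===== PORT A =====
-- proper_label: uri.split(',',1)[0].split('(',1)[0].replace('_',' ').strip()
def proper_label (uri : String) : String :=
  let l1 := ((PySem.Str.splitMax? uri "," 1).getD []).headD ""
  let l2 := ((PySem.Str.splitMax? l1 "(" 1).getD []).headD ""
  PySem.Str.strip (PySem.Str.replace l2 "_" " ")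

def generate_label_ngrams (line : String) : String × List String :=
  let parts := (PySem.Str.split? line "\t").getD []
  let uri := parts.headD ""
  let types : PySem.Set String := PySem.Set.ofList ((PySem.Str.split? (parts.getD 1 "") " ").getD [])
  let redirects := parts.getD 2 ""
  let label := proper_label uri
  let result : PySem.Set String :=
    if PySem.Set.contains types "Person" then
      let words := PySem.Str.split₀ label
      (PySem.List.pyRange 1 ((words.length : Int) + 1) 1).foldl
        (fun acc i =>
          (PySem.List.combinations words i.toNat).foldl
            (fun acc ng => PySem.Set.add acc (PySem.Str.join " " ng)) acc)
        PySem.Set.empty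
    else PySem.Set.add PySem.Set.empty label
  let result := (PySem.Str.split₀ redirects).foldl
    (fun acc r =>
      let rl := proper_label r
      if 0 < PySem.Str.len rl then PySem.Set.add acc rl else acc) result
  (uri, result)

-- ===== PORT B =====
-- proper_label of Source B: one scan over the characters — stop at the first ',' or '(',
-- translate '_' to ' ' on the fly (takeWhile + map is the loop with break/append), then strip.
def proper_label_b (uri : String) : String :=
  let kept := uri.toList.takeWhile (fun c => !(c == ',' || c == '('))
  String.ofList (PySem.Chars.strip (kept.map (fun c => if c == '_' then ' ' else c)))

def generate_label_ngrams_alt (line : String) : String × List String :=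
  match (PySem.Str.split? line "\t").getD [] with
  | [uri, types, redirects] =>
    let base : List String :=
      if ((PySem.Str.split? types " ").getD []).contains "Person" then
        let words := PySem.Str.split₀ (proper_label_b uri)
        let subsets := words.reverse.foldl (fun acc w => acc.map (fun s => w :: s) ++ acc) [[]]
        (PySem.List.pyRange 1 ((words.length : Int) + 1) 1).flatMap
          (fun k => (subsets.filter (fun s => (s.length : Int) == k)).map (fun s => PySem.Str.join " " s))
      else [proper_label_b uri]
    let extras := (PySem.Str.split₀ redirects).map proper_label_b
    (uri, PySem.Set.ofList (base ++ extras.filter (fun rl => 0 < PySem.Str.len rl)))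
  | _ => ("", [])   -- the 3-way unpacking raises ValueError in Python here; outside Pre_

-- ===== PRECONDITION & SPEC =====
-- Pre_ excludes exactly the lines whose tab-split does not have 3 fields: there
-- Python A raises ValueError at the 3-way unpacking (B raises the same way).
def Pre_generate_label_ngrams (line : String) : Prop :=
  ((PySem.Str.split? line "\t").getD []).length = 3
instance (line : String) : Decidable (Pre_generate_label_ngrams line) := by
  unfold Pre_generate_label_ngrams; infer_instance

def pvWitness_generate_label_ngrams : String := "John_Smith\tPerson\tJ_Smith"

def Spec_generate_label_ngrams (line : String) (out : String × List String) : Prop := out = generate_label_ngrams_alt line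
instance (line : String) (out : String × List String) : Decidable (Spec_generate_label_ngrams line out) := by unfold Spec_generate_label_ngrams; infer_instance

-- ===== CLAIM (what is proved, stated in full; the proofs are below) =====
def Claim_equal_generate_label_ngrams : Prop := ∀ (line : String), Dom_generate_label_ngrams line → Pre_generate_label_ngrams line → Spec_generate_label_ngrams line (generate_label_ngrams line)

-- ===== LEMMAS AND PROOFS =====

-- go of splitOnMax prepends the accumulator
theorem splitOnMax_go_acc (sep : List Char) (fuel : Nat) :
    ∀ (m : Nat) (l cur : List Char) (acc : List (List Char)),
    PySem.Chars.splitOnMax.go sep fuel m l cur acc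
      = acc.reverse ++ PySem.Chars.splitOnMax.go sep fuel m l cur [] := by
  induction fuel with
  | zero => intro m l cur acc; simp [PySem.Chars.splitOnMax.go]
  | succ f ih =>
    intro m l cur acc
    cases l with
    | nil => simp [PySem.Chars.splitOnMax.go]
    | cons c rest =>
      by_cases hm : m = 0
      · simp [PySem.Chars.splitOnMax.go, hm]
      · by_cases hp : sep.isPrefixOf (c :: rest) = true
        · simp only [PySem.Chars.splitOnMax.go, hm, hp]
          rw [ih _ _ _ (cur.reverse :: acc), ih _ _ _ ([cur.reverse])]
          simp
        · simp only [PySem.Chars.splitOnMax.go, hm, hp, Bool.false_eq_true, if_false]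
          rw [ih _ _ _ acc]

-- the first field of a single-char maxsplit=1 split is the takeWhile prefix
theorem splitOnMax_go_first (d : Char) :
    ∀ (fuel : Nat) (l cur : List Char), l.length < fuel →
    ∃ rest, PySem.Chars.splitOnMax.go [d] fuel 1 l cur []
      = (cur.reverse ++ l.takeWhile (fun c => !(c == d))) :: rest := by
  intro fuel
  induction fuel with
  | zero => intro l cur h; simp at h
  | succ f ih =>
    intro l cur h
    cases l with
    | nil => exact ⟨[], by simp [PySem.Chars.splitOnMax.go]⟩
    | cons c rest =>
      by_cases hcd : c = d
      · refine ⟨PySem.Chars.splitOnMax.go [d] f 0 rest [] [], ?_⟩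
        subst hcd
        have hp : ([c].isPrefixOf (c :: rest)) = true := by simp [List.isPrefixOf]
        simp only [PySem.Chars.splitOnMax.go, hp, if_true, one_ne_zero, if_false]
        rw [splitOnMax_go_acc]
        simp [List.takeWhile]
      · obtain ⟨r2, hr2⟩ := ih rest (c :: cur) (by simpa using Nat.lt_of_succ_lt_succ h)
        refine ⟨r2, ?_⟩
        have hp : ([d].isPrefixOf (c :: rest)) = false := by
          simp [List.isPrefixOf]; exact fun h' => hcd h'.symm
        have hb : (c == d) = false := by simp [hcd]
        simp only [PySem.Chars.splitOnMax.go, hp, Bool.false_eq_true, if_false]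
        rw [hr2]
        simp [List.takeWhile, hb]

-- head of s.split(d, 1) as a string
theorem head_splitMax_one (s : String) (d : Char) (hd : (String.ofList [d]).toList = [d]) :
    ((PySem.Str.splitMax? s (String.ofList [d]) 1).getD []).headD ""
      = String.ofList (s.toList.takeWhile (fun c => !(c == d))) := by
  obtain ⟨rest, hrest⟩ := splitOnMax_go_first d (s.toList.length + 1) s.toList [] (by omega)
  simp only [show s.toList.length = s.length from by simp] at hrest
  simp [PySem.Str.splitMax?, PySem.Chars.splitMax?, hd, PySem.Chars.splitOnMax, hrest]

-- replace.go with single-char pattern is a map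
theorem replace_go_map :
    ∀ (fuel : Nat) (l acc : List Char), l.length ≤ fuel →
    PySem.Chars.replace.go ['_'] [' '] fuel l acc
      = acc.reverse ++ l.map (fun c => if c == '_' then ' ' else c) := by
  intro fuel
  induction fuel with
  | zero =>
    intro l acc h
    have : l = [] := List.length_eq_zero_iff.mp (Nat.le_zero.mp h)
    subst this; simp [PySem.Chars.replace.go]
  | succ f ih =>
    intro l acc h
    cases l with
    | nil => simp [PySem.Chars.replace.go]
    | cons c rest =>
      by_cases hcd : c = '_'
      · subst hcd
        have hp : (['_'].isPrefixOf ('_' :: rest)) = true := by simp [List.isPrefixOf]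
        simp only [PySem.Chars.replace.go, hp, if_true]
        simp [ih rest (' ' :: acc) (by simpa using Nat.le_of_succ_le_succ h)]
      · have hp : (['_'].isPrefixOf (c :: rest)) = false := by
          simp [List.isPrefixOf]; exact fun h' => hcd h'.symm
        simp only [PySem.Chars.replace.go, hp, Bool.false_eq_true, if_false]
        rw [ih rest (c :: acc) (by simpa using Nat.le_of_succ_le_succ h)]
        simp [hcd]

theorem replace_underscore (cs : List Char) :
    PySem.Chars.replace cs ['_'] [' '] = cs.map (fun c => if c == '_' then ' ' else c) := by
  simp [PySem.Chars.replace, replace_go_map cs.length cs [] le_rfl]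

theorem takeWhile_comp (p q : Char → Bool) (l : List Char) :
    (l.takeWhile p).takeWhile q = l.takeWhile (fun c => p c && q c) := by
  induction l with
  | nil => rfl
  | cons c t ih =>
    by_cases hp : p c = true
    · by_cases hq : q c = true
      · simp [List.takeWhile, hp, hq, ih]
      · simp [List.takeWhile, hp, hq]
    · simp [List.takeWhile, hp]

-- the two proper_label computations agree
theorem proper_label_eq (u : String) : proper_label_b u = proper_label u := by
  unfold proper_label proper_label_b
  have h1 : ((PySem.Str.splitMax? u "," 1).getD []).headD ""
      = String.ofList (u.toList.takeWhile (fun c => !(c == ','))) :=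
    head_splitMax_one u ',' rfl
  have h2 := head_splitMax_one (String.ofList (u.toList.takeWhile (fun c => !(c == ',')))) '(' rfl
  simp only [h1, h2, String.toList_ofList] at *
  rw [takeWhile_comp]
  have hpred : (fun c => !(c == ',') && !(c == '(')) = (fun c => !(c == ',' || c == '(')) := by
    funext c; simp [Bool.not_or]
  rw [hpred]
  have hu : ("_" : String).toList = ['_'] := rfl
  have hs : (" " : String).toList = [' '] := rfl
  simp only [PySem.Str.strip, PySem.Str.replace, String.toList_ofList, hu, hs]
  rw [replace_underscore]

-- the power set in the builder's final order
def powList {α : Type} : List α → List (List α)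
  | [] => [[]]
  | w :: ws => (powList ws).map (w :: ·) ++ powList ws

theorem builder_eq_powList {α : Type} (ws : List α) :
    ws.reverse.foldl (fun acc w => acc.map (fun s => w :: s) ++ acc) [[]] = powList ws := by
  rw [List.foldl_reverse]
  induction ws with
  | nil => rfl
  | cons w ws ih => simp [powList, List.foldr_cons, ih]

theorem filter_powList_eq_combinations {α : Type} (ws : List α) (n : Nat) :
    (powList ws).filter (fun s => s.length == n) = PySem.List.combinations ws n := by
  induction ws generalizing n with
  | nil =>
    cases n with
    | zero => simp [powList, PySem.List.combinations_zero]
    | succ n => simp [powList, PySem.List.combinations_nil_succ]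
  | cons w ws ih =>
    cases n with
    | zero =>
      have h1 : ((powList ws).map (w :: ·)).filter (fun s => s.length == 0) = [] := by
        simp [List.filter_map, List.filter_eq_nil_iff]
      simp only [powList, List.filter_append, h1, List.nil_append, ih,
        PySem.List.combinations_zero]
    | succ n =>
      have h1 : ((powList ws).map (w :: ·)).filter (fun s => s.length == n + 1)
          = ((powList ws).filter (fun s => s.length == n)).map (w :: ·) := by
        rw [List.filter_map]
        congr 1
        apply List.filter_congr
        intro s _
        simp
      simp only [powList, List.filter_append, h1, ih, PySem.List.combinations_cons_succ]

-- A's Person branch builds exactly the set of B's grouped power-set list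
theorem person_branch_eq (words : List String) :
    (PySem.List.pyRange 1 ((words.length : Int) + 1) 1).foldl
        (fun acc i =>
          (PySem.List.combinations words i.toNat).foldl
            (fun acc ng => PySem.Set.add acc (PySem.Str.join " " ng)) acc)
        PySem.Set.empty
    = PySem.Set.ofList
        ((PySem.List.pyRange 1 ((words.length : Int) + 1) 1).flatMap
          (fun k => (((words.reverse.foldl (fun acc w => acc.map (fun s => w :: s) ++ acc) [[]]).filter
              (fun s => (s.length : Int) == k)).map (fun s => PySem.Str.join " " s)))) := by
  rw [PySem.Set.ofList_eq_foldl, List.foldl_flatMap]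
  apply PySem.List.foldl_congr_mem
  intro acc i hi
  rw [builder_eq_powList]
  have h1 : 1 ≤ i := (PySem.List.mem_pyRange_one.mp hi).1
  have hfil : (powList words).filter (fun s => ((s.length : Int) == i))
      = PySem.List.combinations words i.toNat := by
    rw [← filter_powList_eq_combinations]
    apply List.filter_congr
    intro s _
    have : ((s.length : Int) = i) ↔ (s.length == i.toNat) = true := by
      rw [beq_iff_eq]; omega
    by_cases h : (s.length == i.toNat) = true <;> simp_all
  rw [hfil, List.foldl_map]

-- the redirect loop is one update with the filtered mapped list
theorem foldl_if_add_update (g : String → String) (l : List String) (s : PySem.Set String) :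
    l.foldl (fun acc r =>
        let rl := g r
        if 0 < PySem.Str.len rl then PySem.Set.add acc rl else acc) s
      = PySem.Set.update s ((l.map g).filter (fun rl => 0 < PySem.Str.len rl)) := by
  induction l generalizing s with
  | nil => rfl
  | cons r t ih =>
    simp only [List.foldl_cons, List.map_cons, List.filter_cons]
    by_cases hp : 0 < PySem.Str.len (g r)
    · rw [if_pos hp, if_pos (by simpa using hp), PySem.Set.update_cons, ih]
    · rw [if_neg hp, if_neg (by simpa using hp), ih]

theorem ofList_singleton_set (x : String) :
    PySem.Set.ofList [x] = PySem.Set.add PySem.Set.empty x := rfl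

theorem contains_ofList_eq (l : List String) (x : String) :
    PySem.Set.contains (PySem.Set.ofList l) x = l.contains x := by
  rw [Bool.eq_iff_iff, PySem.Set.contains_iff, PySem.Set.mem_ofList, List.contains_iff_mem]

-- ===== VERDICT (by name: the statement is the Claim_ definition above) =====
theorem generate_label_ngrams_spec : Claim_equal_generate_label_ngrams := by
  intro line _ hpre
  show _ = _
  obtain ⟨u, t, r, hparts⟩ := List.length_eq_three.mp hpre
  have hfun : proper_label_b = proper_label := funext proper_label_eq
  unfold generate_label_ngrams generate_label_ngrams_alt
  rw [hparts]
  simp only [List.headD_cons, List.getD, List.getElem?_cons_succ, List.getElem?_cons_zero,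
    Option.getD_some, hfun, contains_ofList_eq]
  rw [foldl_if_add_update, PySem.Set.ofList_append]
  by_cases hP : ((PySem.Str.split? t " ").getD []).contains "Person" = true
  · simp only [hP, if_true, person_branch_eq]
  · simp only [hP, Bool.false_eq_true, if_false, ofList_singleton_set]
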